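-- pv_equiv track=rewrite | github.com/APELSIN4T/number_counter_py | number_counter.py | len_int_first
-- ===== SOURCE A (Python) =====
-- def len_int_first(_line): #посчитать длину первого числа
--     k = 0
--     _max = 0
--     _line = _line + "*"
--     for i in range(len(_line)):
--         if _line[i].isdigit():
--             k += 1
--         else:
--             if k > _max:
--                 _max = k
--                 return _max
--             k = 0
-- ===== SOURCE B (Python) =====
-- def len_int_first(_line):
--     i = 0
--     n = len(_line)
--     while i < n and not _line[i].isdigit():
--         i += 1
--     j = i
--     while j < n and _line[j].isdigit():
--         j += 1
--     return j - i if j > i else None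
-- ===== Notes on version B (the rewrite author's own statement) =====
-- stated objective: simpler
-- what changed: Replaced A's sentinel-append plus reset-counter fold with a two-phase find-then-measure scan: skip non-digits, then count the digit run; no sentinel, no _max state.
import Mathlib
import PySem

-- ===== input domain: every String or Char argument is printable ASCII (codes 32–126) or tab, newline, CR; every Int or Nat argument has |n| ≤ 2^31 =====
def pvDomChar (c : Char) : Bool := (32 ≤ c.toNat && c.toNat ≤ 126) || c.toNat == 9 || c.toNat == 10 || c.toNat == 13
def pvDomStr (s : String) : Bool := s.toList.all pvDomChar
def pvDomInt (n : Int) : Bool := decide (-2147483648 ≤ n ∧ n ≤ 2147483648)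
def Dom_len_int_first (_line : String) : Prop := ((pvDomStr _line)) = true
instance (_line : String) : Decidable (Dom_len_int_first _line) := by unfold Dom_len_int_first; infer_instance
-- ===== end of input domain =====

-- B replaces A's sentinel-append plus reset-counter loop by a two-phase skip/count scan; return values proved equal.

-- ===== PORT A =====
-- A appends a star sentinel and scans with a counter k, returning k at the first non-digit after a run; falling off the loop yields None.
def lenLoopA : List Char → Int → Option Int
  | [], _ => none
  | c :: rest, k =>
    if PySem.Chars.isdigit c then lenLoopA rest (k + 1)
    else if k > 0 then some k else lenLoopA rest 0

def len_int_first (_line : String) : Option Int :=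
  lenLoopA (_line.toList ++ ['*']) 0

-- ===== PORT B =====
-- B: skip non-digits (first while loop), then count the digit run (second while loop).
def skipNonDigit : List Char → List Char
  | [] => []
  | c :: rest => if PySem.Chars.isdigit c then c :: rest else skipNonDigit rest

def countDigits : List Char → Int
  | [] => 0
  | c :: rest => if PySem.Chars.isdigit c then 1 + countDigits rest else 0

def len_int_first_alt (_line : String) : Option Int :=
  let n := countDigits (skipNonDigit _line.toList)
  if n > 0 then some n else none

-- ===== PRECONDITION & SPEC =====
def Spec_len_int_first (_line : String) (out : Option Int) : Prop := out = len_int_first_alt _line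
instance (_line : String) (out : Option Int) : Decidable (Spec_len_int_first _line out) := by unfold Spec_len_int_first; infer_instance

-- ===== CLAIM (what is proved, stated in full; the proofs are below) =====
def Claim_equal_len_int_first : Prop := ∀ (_line : String), Dom_len_int_first _line → Spec_len_int_first _line (len_int_first _line)

-- ===== LEMMAS AND PROOFS =====
theorem countDigits_nonneg (l : List Char) : 0 ≤ countDigits l := by
  induction l with
  | nil => simp [countDigits]
  | cons c rest ih => simp only [countDigits]; split <;> omega

theorem lenLoopA_pos (l : List Char) (k : Int) (hk : 0 < k) :
    lenLoopA (l ++ ['*']) k = some (k + countDigits l) := by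
  induction l generalizing k with
  | nil => simp [lenLoopA, countDigits, hk, show PySem.Chars.isdigit '*' = false by decide]
  | cons c rest ih =>
    simp only [List.cons_append, lenLoopA, countDigits]
    by_cases h : PySem.Chars.isdigit c = true
    · rw [if_pos h, if_pos h, ih (k + 1) (by omega)]
      congr 1; ring
    · simp [h, hk]

theorem lenLoopA_zero (l : List Char) :
    lenLoopA (l ++ ['*']) 0 =
      (let n := countDigits (skipNonDigit l); if n > 0 then some n else none) := by
  induction l with
  | nil => simp [lenLoopA, skipNonDigit, countDigits,
      show PySem.Chars.isdigit '*' = false by decide]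
  | cons c rest ih =>
    simp only [List.cons_append, lenLoopA, skipNonDigit]
    by_cases h : PySem.Chars.isdigit c = true
    · have hc := countDigits_nonneg rest
      rw [if_pos h, if_pos h, show (0:Int) + 1 = 1 by ring, lenLoopA_pos rest 1 (by omega)]
      simp only [countDigits, h, if_pos]
      rw [if_pos (by omega)]
    · simp only [h, if_false, if_neg (by omega : ¬ (0:Int) > 0), Bool.false_eq_true]
      exact ih

-- ===== VERDICT (by name: the statement is the Claim_ definition above) =====
theorem len_int_first_spec : Claim_equal_len_int_first := by
  intro s _
  unfold Spec_len_int_first len_int_first len_int_first_alt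
  exact lenLoopA_zero s.toList
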